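-- pv_equiv track=rewrite | github.com/Bonujumanova/coderun | young_yandex/D_2.py | find_k_items
-- ===== SOURCE A (Python) =====
-- def find_k_items(k: int, themes: list[int]) -> str:
--     used: set[int] = set()
--     result: list[int] = []
--     for theme in themes:  # Сначала добавляем все уникальные темы
--
--         if theme not in used:
--             result.append(theme)
--             used.add(theme)
--             if len(result) == k:
--                 break
--
--     if len(result) < k:  # Если уникальных тем не хватило,
--         # добираем остальные задачи
--         for theme in themes:
--
--             if len(result) == k:
--                 break
--             if theme in used:
--                 result.append(theme)
--
--     return " ".join(map(str, result))
-- ===== SOURCE B (Python) =====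
-- def find_k_items(k: int, themes: list[int]) -> str:
--     first = {}
--     for i, t in enumerate(themes):
--         first.setdefault(t, i)
--     ordered = sorted(first, key=first.get)
--     return " ".join(map(str, (ordered + themes)[:max(k, 0)]))
-- ===== Notes on version B (the rewrite author's own statement) =====
-- stated objective: alternative
-- what changed: Replaces A's two membership-testing loops with mid-loop breaks by a first-occurrence index map built once, a stable sort of its keys by that index, and a single slice of one candidate stream (uniques followed by the full list).
-- intended difference: On k <= 0 with a nonempty list A returns all unique themes (its break test only runs after an append, so it never fires), while B returns the empty string, the intended answer when at most zero themes are requested. — e.g. on find_k_items(0, [5]): A returns "5", B returns ""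
import Mathlib
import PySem

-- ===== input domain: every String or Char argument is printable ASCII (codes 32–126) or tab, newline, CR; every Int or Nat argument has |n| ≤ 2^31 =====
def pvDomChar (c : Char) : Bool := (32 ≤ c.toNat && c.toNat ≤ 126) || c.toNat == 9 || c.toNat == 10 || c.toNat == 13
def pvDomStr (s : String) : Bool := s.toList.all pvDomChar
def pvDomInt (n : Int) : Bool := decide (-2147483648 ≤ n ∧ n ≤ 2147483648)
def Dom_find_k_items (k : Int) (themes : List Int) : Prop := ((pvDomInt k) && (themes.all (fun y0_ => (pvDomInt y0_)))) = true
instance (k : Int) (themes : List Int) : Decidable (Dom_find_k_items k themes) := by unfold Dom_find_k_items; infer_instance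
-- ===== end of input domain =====

-- B replaces A's two membership-testing loops with breaks by a first-occurrence index map,
-- a sort of the keys by that index, and one slice of a single candidate stream (objective:
-- alternative); on k ≤ 0 with nonempty themes B intentionally returns "" where A returns
-- all unique themes (see D_find_k_items below).

-- ===== PORT A =====
-- first loop: collect unique themes, break once len(result) == k (checked after append)
def pvLoop1 (k : Int) : List Int → PySem.Set Int → List Int → PySem.Set Int × List Int
  | [], used, result => (used, result)
  | theme :: rest, used, result =>
    if PySem.Set.contains used theme = false then
      let result' := result ++ [theme]
      let used' := PySem.Set.add used theme
      if (result'.length : Int) = k then (used', result')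
      else pvLoop1 k rest used' result'
    else pvLoop1 k rest used result

-- second loop: append themes already in `used` until len(result) == k (checked before append)
def pvLoop2 (k : Int) : List Int → PySem.Set Int → List Int → List Int
  | [], _, result => result
  | theme :: rest, used, result =>
    if (result.length : Int) = k then result
    else if PySem.Set.contains used theme = true then pvLoop2 k rest used (result ++ [theme])
    else pvLoop2 k rest used result

def find_k_items (k : Int) (themes : List Int) : String :=
  let p := pvLoop1 k themes PySem.Set.empty []
  let result := if (p.2.length : Int) < k then pvLoop2 k themes p.1 p.2 else p.2
  PySem.Str.join " " (result.map PySem.Int.toStr)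

-- ===== PORT B =====
def find_k_items_alt (k : Int) (themes : List Int) : String :=
  -- first = {}; for i, t in enumerate(themes): first.setdefault(t, i)
  let first := (PySem.List.enumerate themes).foldl
    (fun d (p : Int × Int) => d.setdefault p.2 p.1) PySem.Dict.empty
  -- ordered = sorted(first, key=first.get)   (every key is present, so .get is its index)
  let ordered := PySem.List.sorted (PySem.Dict.keys first) (fun t => first.getD t 0)
  -- " ".join(map(str, (ordered + themes)[:max(k, 0)]))
  PySem.Str.join " "
    ((PySem.List.slice (ordered ++ themes) none (some (max k 0))).map PySem.Int.toStr)

-- ===== PRECONDITION & SPEC =====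
-- On k ≤ 0 with nonempty themes A returns ALL unique themes (its break test runs only after
-- an append, so it never fires), while B returns "" — the intended answer when at most zero
-- themes are requested.
def D_find_k_items (k : Int) (themes : List Int) : Prop := k ≤ 0 ∧ themes ≠ []
instance (k : Int) (themes : List Int) : Decidable (D_find_k_items k themes) := by unfold D_find_k_items; infer_instance

def Spec_find_k_items (k : Int) (themes : List Int) (out : String) : Prop := ¬ D_find_k_items k themes → out = find_k_items_alt k themes
instance (k : Int) (themes : List Int) (out : String) : Decidable (Spec_find_k_items k themes out) := by unfold Spec_find_k_items; infer_instance

def pvDiffWitness_find_k_items : Int × List Int := (0, [5])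
def pvDiffWitnessOut_find_k_items : String × String := ("5", "")

-- ===== CLAIM (what is proved, stated in full; the proofs are below) =====
def Claim_unchanged_find_k_items : Prop := ∀ (k : Int) (themes : List Int), Dom_find_k_items k themes → Spec_find_k_items k themes (find_k_items k themes)
def Claim_changed_find_k_items : Prop := Dom_find_k_items (pvDiffWitness_find_k_items.1) (pvDiffWitness_find_k_items.2) ∧ D_find_k_items (pvDiffWitness_find_k_items.1) (pvDiffWitness_find_k_items.2) ∧ find_k_items (pvDiffWitness_find_k_items.1) (pvDiffWitness_find_k_items.2) = pvDiffWitnessOut_find_k_items.1 ∧ find_k_items_alt (pvDiffWitness_find_k_items.1) (pvDiffWitness_find_k_items.2) = pvDiffWitnessOut_find_k_items.2 ∧ pvDiffWitnessOut_find_k_items.1 ≠ pvDiffWitnessOut_find_k_items.2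
def Claim_exact_find_k_items : Prop := ∀ (k : Int) (themes : List Int), Dom_find_k_items k themes → D_find_k_items k themes → find_k_items k themes ≠ find_k_items_alt k themes

-- ===== LEMMAS AND PROOFS =====

-- the fresh (not-yet-seen) themes of ts relative to a seen-set u, in order, deduplicated
def pvFresh : List Int → PySem.Set Int → List Int
  | [], _ => []
  | t :: ts, u =>
    if PySem.Set.contains u t then pvFresh ts u else t :: pvFresh ts (PySem.Set.add u t)

-- the same list paired with the index of each element's first occurrence (scan starts at i)
def pvFreshIdx : List Int → Int → PySem.Set Int → List (Int × Int)
  | [], _, _ => []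
  | t :: ts, i, u =>
    if PySem.Set.contains u t then pvFreshIdx ts (i + 1) u
    else (t, i) :: pvFreshIdx ts (i + 1) (PySem.Set.add u t)

theorem pvFoldlAdd_eq (ts : List Int) : ∀ u : PySem.Set Int,
    ts.foldl PySem.Set.add u = u ++ pvFresh ts u := by
  induction ts with
  | nil => intro u; simp [pvFresh]
  | cons t ts ih =>
    intro u
    by_cases h : t ∈ u
    · have hadd : PySem.Set.add u t = u := PySem.Set.add_of_mem h
      simp [pvFresh, h, List.foldl, ih]
    · have hadd : PySem.Set.add u t = u ++ [t] := PySem.Set.add_of_not_mem h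
      simp [pvFresh, h, List.foldl, ih]

theorem pvDedup_eq_fresh (ts : List Int) : PySem.List.dedup ts = pvFresh ts [] := by
  have := pvFoldlAdd_eq ts []
  simpa [PySem.List.dedup_eq_ofList, PySem.Set.ofList_eq_foldl] using this

-- loop 1 when the break never fires: all fresh themes are appended, used becomes foldl add
theorem pvLoop1_nobreak (k : Int) (ts : List Int) : ∀ (u : PySem.Set Int) (r : List Int),
    ¬ ((r.length : Int) < k ∧ k ≤ (r.length : Int) + ((pvFresh ts u).length : Int)) →
    pvLoop1 k ts u r = (ts.foldl PySem.Set.add u, r ++ pvFresh ts u) := by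
  induction ts with
  | nil => intro u r _; simp [pvLoop1, pvFresh]
  | cons t ts ih =>
    intro u r h
    by_cases hm : t ∈ u
    · have hc : PySem.Set.contains u t = true := (PySem.Set.contains_iff u t).mpr hm
      have hadd : PySem.Set.add u t = u := PySem.Set.add_of_mem hm
      have hfr : pvFresh (t :: ts) u = pvFresh ts u := by simp [pvFresh, hm]
      rw [hfr] at h
      rw [show pvLoop1 k (t :: ts) u r = pvLoop1 k ts u r by simp [pvLoop1, hm]]
      rw [ih u r h, hfr]
      simp [List.foldl, hadd]
    · have hc : PySem.Set.contains u t = false := by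
        simpa using fun hx => hm ((PySem.Set.contains_iff u t).mp hx)
      have hfr : pvFresh (t :: ts) u = t :: pvFresh ts (PySem.Set.add u t) := by
        simp [pvFresh, hm]
      rw [hfr] at h
      simp only [List.length_cons] at h
      have hne : (r.length : Int) + 1 ≠ k := by
        intro he
        exact h ⟨by omega, by push_cast; omega⟩
      rw [show pvLoop1 k (t :: ts) u r
            = pvLoop1 k ts (PySem.Set.add u t) (r ++ [t]) by simp [pvLoop1, hm, hne]]
      rw [ih (PySem.Set.add u t) (r ++ [t]) (by
        simp only [List.length_append, List.length_cons, List.length_nil]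
        intro hx
        obtain ⟨h1, h2⟩ := hx
        push_cast at h1 h2
        exact h ⟨by omega, by push_cast; omega⟩)]
      simp [List.foldl, hfr]

-- loop 1 when the break fires: result is r plus the first (k - len r) fresh themes
theorem pvLoop1_break (k : Int) (ts : List Int) : ∀ (u : PySem.Set Int) (r : List Int),
    (r.length : Int) < k → k ≤ (r.length : Int) + ((pvFresh ts u).length : Int) →
    (pvLoop1 k ts u r).2 = r ++ (pvFresh ts u).take (k - (r.length : Int)).toNat := by
  induction ts with
  | nil => intro u r h1 h2; simp [pvFresh] at h2; omega
  | cons t ts ih =>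
    intro u r h1 h2
    by_cases hm : t ∈ u
    · have hc : PySem.Set.contains u t = true := (PySem.Set.contains_iff u t).mpr hm
      have hfr : pvFresh (t :: ts) u = pvFresh ts u := by simp [pvFresh, hm]
      rw [hfr] at h2 ⊢
      rw [show pvLoop1 k (t :: ts) u r = pvLoop1 k ts u r by simp [pvLoop1, hm]]
      exact ih u r h1 h2
    · have hc : PySem.Set.contains u t = false := by
        simpa using fun hx => hm ((PySem.Set.contains_iff u t).mp hx)
      have hfr : pvFresh (t :: ts) u = t :: pvFresh ts (PySem.Set.add u t) := by
        simp [pvFresh, hm]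
      rw [hfr] at h2 ⊢
      simp only [List.length_cons] at h2
      by_cases he : (r.length : Int) + 1 = k
      · rw [show pvLoop1 k (t :: ts) u r
              = (PySem.Set.add u t, r ++ [t]) by simp [pvLoop1, hm, he]]
        have hone : (k - (r.length : Int)).toNat = 1 := by omega
        simp [hone]
      · rw [show pvLoop1 k (t :: ts) u r
              = pvLoop1 k ts (PySem.Set.add u t) (r ++ [t]) by simp [pvLoop1, hm, he]]
        have h1' : (((r ++ [t]).length : Nat) : Int) < k := by
          simp only [List.length_append, List.length_cons, List.length_nil]
          push_cast at he ⊢; omega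
        have h2' : k ≤ (((r ++ [t]).length : Nat) : Int) + ((pvFresh ts (PySem.Set.add u t)).length : Int) := by
          simp only [List.length_append, List.length_cons, List.length_nil]
          push_cast at h2 ⊢; omega
        rw [ih (PySem.Set.add u t) (r ++ [t]) h1' h2']
        have hk : (k - (r.length : Int)).toNat = (k - ((r ++ [t]).length : Int)).toNat + 1 := by
          simp only [List.length_append, List.length_cons, List.length_nil]
          push_cast; omega
        simp [hk, List.take_succ_cons]

-- loop 2 when every theme is in `used`: appends the first (k - len r) themes
theorem pvLoop2_all (k : Int) (ts : List Int) : ∀ (u : PySem.Set Int) (r : List Int),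
    (r.length : Int) ≤ k → (∀ t ∈ ts, PySem.Set.contains u t = true) →
    pvLoop2 k ts u r = r ++ ts.take (k - (r.length : Int)).toNat := by
  induction ts with
  | nil => intro u r _ _; simp [pvLoop2]
  | cons t ts ih =>
    intro u r h1 hall
    by_cases he : (r.length : Int) = k
    · have h0 : (k - (r.length : Int)).toNat = 0 := by omega
      simp [pvLoop2, he]
    · have hmem : t ∈ u := (PySem.Set.contains_iff u t).mp (hall t (by simp))
      rw [show pvLoop2 k (t :: ts) u r = pvLoop2 k ts u (r ++ [t]) by simp [pvLoop2, he, hmem]]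
      have h1' : (((r ++ [t]).length : Nat) : Int) ≤ k := by
        simp only [List.length_append, List.length_cons, List.length_nil]; push_cast; omega
      rw [ih u (r ++ [t]) h1' (fun x hx => hall x (by simp [hx]))]
      have hk : (k - (r.length : Int)).toNat = (k - ((r ++ [t]).length : Int)).toNat + 1 := by
        simp only [List.length_append, List.length_cons, List.length_nil]; push_cast; omega
      simp [hk, List.take_succ_cons]

theorem pvContains_foldlAdd (ts : List Int) (u : PySem.Set Int) (t : Int) (h : t ∈ ts) :
    PySem.Set.contains (ts.foldl PySem.Set.add u) t = true := by
  rw [PySem.Set.contains_iff]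
  have hx := (PySem.Set.mem_foldl_add (f := fun b : Int => b) (l := ts) (s := u) (y := t)).mpr
    (Or.inr ⟨t, h, rfl⟩)
  simpa using hx

-- A's result list, characterised: all fresh themes when k ≤ 0, else the k-prefix of fresh ++ themes
theorem pvResultA (k : Int) (themes : List Int) :
    (if (((pvLoop1 k themes PySem.Set.empty []).2.length : Nat) : Int) < k
     then pvLoop2 k themes (pvLoop1 k themes PySem.Set.empty []).1 (pvLoop1 k themes PySem.Set.empty []).2
     else (pvLoop1 k themes PySem.Set.empty []).2) =
    if 0 < k then (pvFresh themes [] ++ themes).take k.toNat else pvFresh themes [] := by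
  by_cases hk : 0 < k
  · by_cases hlen : k ≤ ((pvFresh themes []).length : Int)
    · have hbr := pvLoop1_break k themes [] [] (by simpa using hk) (by simpa using hlen)
      simp only [List.length_nil, Nat.cast_zero, List.nil_append, Int.sub_zero] at hbr
      have htake : (pvFresh themes [] ++ themes).take k.toNat = (pvFresh themes []).take k.toNat :=
        List.take_append_of_le_length (show k.toNat ≤ (pvFresh themes []).length by omega)
      have htlen : (((pvFresh themes []).take k.toNat).length : Int) = k := by
        rw [List.length_take]; omega
      have hplen : (pvLoop1 k themes PySem.Set.empty []).2 = (pvFresh themes []).take k.toNat := by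
        simpa [PySem.Set.empty] using hbr
      rw [if_pos hk, htake]
      simp only [hplen, htlen]
      rw [if_neg (lt_irrefl k)]
    · rw [not_le] at hlen
      have hnb := pvLoop1_nobreak k themes [] [] (by simp; omega)
      simp only [List.nil_append] at hnb
      have hp2 : (pvLoop1 k themes PySem.Set.empty []).2 = pvFresh themes [] := by
        simpa [PySem.Set.empty] using congrArg Prod.snd hnb
      have hp1 : (pvLoop1 k themes PySem.Set.empty []).1 = themes.foldl PySem.Set.add [] := by
        simpa [PySem.Set.empty] using congrArg Prod.fst hnb
      have hl2 := pvLoop2_all k themes (themes.foldl PySem.Set.add []) (pvFresh themes [])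
        (le_of_lt hlen) (fun t ht => pvContains_foldlAdd themes [] t ht)
      have htake : (pvFresh themes [] ++ themes).take k.toNat
          = pvFresh themes [] ++ themes.take (k - ((pvFresh themes []).length : Int)).toNat := by
        rw [List.take_append,
            List.take_of_length_le (show (pvFresh themes []).length ≤ k.toNat by omega),
            show k.toNat - (pvFresh themes []).length
              = (k - ((pvFresh themes []).length : Int)).toNat by omega]
      simp only [hp2, hp1, if_pos hlen, hl2, if_pos hk, htake]
  · rw [not_lt] at hk
    have hnb := pvLoop1_nobreak k themes [] [] (by simp; omega)
    simp only [List.nil_append] at hnb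
    have hp2 : (pvLoop1 k themes PySem.Set.empty []).2 = pvFresh themes [] := by
      simpa [PySem.Set.empty] using congrArg Prod.snd hnb
    have hnl : ¬ (((pvFresh themes []).length : Int) < k) := by omega
    simp only [hp2, if_neg hnl, if_neg (by omega : ¬ (0:Int) < k)]

-- the indexed fresh list projects to the fresh list
theorem pvFreshIdx_map_fst (ts : List Int) : ∀ (i : Int) (u : PySem.Set Int),
    (pvFreshIdx ts i u).map (fun p => p.1) = pvFresh ts u := by
  induction ts with
  | nil => intro i u; simp [pvFreshIdx, pvFresh]
  | cons t ts ih =>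
    intro i u
    by_cases hm : t ∈ u
    · simp [pvFreshIdx, pvFresh, hm, ih]
    · simp [pvFreshIdx, pvFresh, hm, ih]

-- second components of the indexed fresh list are ≥ the start index
theorem pvFreshIdx_snd_ge (ts : List Int) : ∀ (i : Int) (u : PySem.Set Int),
    ∀ p ∈ pvFreshIdx ts i u, i ≤ p.2 := by
  induction ts with
  | nil => intro i u p hp; simp [pvFreshIdx] at hp
  | cons t ts ih =>
    intro i u p hp
    by_cases hm : t ∈ u
    · rw [show pvFreshIdx (t :: ts) i u = pvFreshIdx ts (i + 1) u by simp [pvFreshIdx, hm]] at hp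
      have := ih (i + 1) u p hp; omega
    · rw [show pvFreshIdx (t :: ts) i u
            = (t, i) :: pvFreshIdx ts (i + 1) (PySem.Set.add u t) by simp [pvFreshIdx, hm]] at hp
      rcases List.mem_cons.mp hp with h | h
      · subst h; omega
      · have := ih (i + 1) (PySem.Set.add u t) p h; omega

-- and they are strictly increasing along the list
theorem pvFreshIdx_pairwise (ts : List Int) : ∀ (i : Int) (u : PySem.Set Int),
    (pvFreshIdx ts i u).Pairwise (fun p q => p.2 < q.2) := by
  induction ts with
  | nil => intro i u; simp [pvFreshIdx]
  | cons t ts ih =>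
    intro i u
    by_cases hm : t ∈ u
    · rw [show pvFreshIdx (t :: ts) i u = pvFreshIdx ts (i + 1) u by simp [pvFreshIdx, hm]]
      exact ih (i + 1) u
    · rw [show pvFreshIdx (t :: ts) i u
            = (t, i) :: pvFreshIdx ts (i + 1) (PySem.Set.add u t) by simp [pvFreshIdx, hm]]
      exact List.pairwise_cons.mpr
        ⟨fun p hp => by have := pvFreshIdx_snd_ge ts (i + 1) (PySem.Set.add u t) p hp; omega,
         ih (i + 1) (PySem.Set.add u t)⟩

-- the dict-building loop of B: its items are exactly the indexed fresh list
theorem pvBuild_items (ts : List Int) : ∀ (i : Int) (d : PySem.Dict Int Int),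
    ((PySem.List.enumerate ts i).foldl (fun d (p : Int × Int) => d.setdefault p.2 p.1) d).items
      = d.items ++ pvFreshIdx ts i d.keys := by
  induction ts with
  | nil => intro i d; simp [PySem.List.enumerate_nil, pvFreshIdx]
  | cons t ts ih =>
    intro i d
    rw [PySem.List.enumerate_cons]
    by_cases hm : t ∈ d.keys
    · have hc : d.contains t = true := (PySem.Dict.contains_iff_mem_keys d t).mpr hm
      simp only [List.foldl_cons, PySem.Dict.setdefault_of_contains d i hc]
      rw [ih (i + 1) d]
      simp [pvFreshIdx, hm]
    · have hc : d.contains t = false := by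
        rcases h : d.contains t with _ | _
        · rfl
        · exact absurd ((PySem.Dict.contains_iff_mem_keys d t).mp h) hm
      simp only [List.foldl_cons, PySem.Dict.setdefault_of_not_contains d i hc]
      rw [ih (i + 1) (d.insert t i)]
      rw [PySem.Dict.items_insert_of_not_contains d i hc,
          PySem.Dict.keys_insert_of_not_contains d i hc]
      have hadd : PySem.Set.add d.keys t = d.keys ++ [t] := PySem.Set.add_of_not_mem hm
      rw [show pvFreshIdx (t :: ts) i d.keys
            = (t, i) :: pvFreshIdx ts (i + 1) (PySem.Set.add d.keys t) by simp [pvFreshIdx, hm]]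
      rw [hadd]
      simp

-- B's `ordered` list is the fresh (first-occurrence) list: the keys come out of the dict in
-- first-occurrence order and their stored indices are strictly increasing, so the stable sort
-- keeps them in place
theorem pvOrdered_eq (themes : List Int) :
    PySem.List.sorted
        (PySem.Dict.keys ((PySem.List.enumerate themes).foldl
          (fun d (p : Int × Int) => d.setdefault p.2 p.1) PySem.Dict.empty))
        (fun t => ((PySem.List.enumerate themes).foldl
          (fun d (p : Int × Int) => d.setdefault p.2 p.1) PySem.Dict.empty).getD t 0)
      = pvFresh themes [] := by
  have hitems := pvBuild_items themes 0 PySem.Dict.empty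
  rw [show (PySem.Dict.empty : PySem.Dict Int Int).items = [] from rfl,
      show (PySem.Dict.empty : PySem.Dict Int Int).keys = [] from rfl, List.nil_append] at hitems
  set d := (PySem.List.enumerate themes).foldl
      (fun d (p : Int × Int) => d.setdefault p.2 p.1) PySem.Dict.empty with hd
  have hkeys : d.keys = pvFresh themes [] := by
    show d.items.map (fun p => p.1) = _
    rw [hitems, pvFreshIdx_map_fst]
  have hnodup : d.keys.Nodup := by
    rw [hkeys, ← pvDedup_eq_fresh]
    exact PySem.List.nodup_dedup themes
  have hpw : d.keys.Pairwise (fun a b => d.getD a 0 < d.getD b 0) := by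
    show (d.items.map (fun p => p.1)).Pairwise _
    rw [List.pairwise_map, hitems]
    refine (pvFreshIdx_pairwise themes 0 []).imp_of_mem ?_
    intro p q hp hq hlt
    rw [← hitems] at hp hq
    rcases p with ⟨a, ia⟩; rcases q with ⟨b, ib⟩
    rw [PySem.Dict.getD_of_mem_items d hp hnodup 0,
        PySem.Dict.getD_of_mem_items d hq hnodup 0]
    exact hlt
  rw [PySem.List.sorted_eq_of_perm_of_pairwise_lt d.keys d.keys _ (List.Perm.refl _) hpw]
  exact hkeys

-- B's result list
theorem pvResultB (k : Int) (themes : List Int) :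
    PySem.List.slice
        (PySem.List.sorted
            (PySem.Dict.keys ((PySem.List.enumerate themes).foldl
              (fun d (p : Int × Int) => d.setdefault p.2 p.1) PySem.Dict.empty))
            (fun t => ((PySem.List.enumerate themes).foldl
              (fun d (p : Int × Int) => d.setdefault p.2 p.1) PySem.Dict.empty).getD t 0)
          ++ themes) none (some (max k 0))
      = (pvFresh themes [] ++ themes).take (max k 0).toNat := by
  rw [pvOrdered_eq themes]
  exact PySem.List.slice_to _ (le_max_right k 0)

-- a space-join of a nonempty list of nonempty strings is nonempty (for the tight claim)
theorem pvJoin_ne_empty (s : String) (l : List String) (h : s ≠ "") :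
    PySem.Str.join " " (s :: l) ≠ "" := by
  intro hc
  have h2 := congrArg String.toList hc
  cases l with
  | nil => simp [PySem.Str.join, PySem.Chars.join, List.intercalate] at h2; exact h h2
  | cons b bs =>
    simp [PySem.Str.join, PySem.Chars.join, List.intercalate] at h2

theorem pvToChars_ne_nil (n : Int) : PySem.Int.toChars n ≠ [] := by
  unfold PySem.Int.toChars
  split
  · simp
  · exact List.ne_nil_of_length_pos Nat.length_toDigits_pos

-- ===== VERDICT (by name: the statement is the Claim_ definition above) =====
theorem find_k_items_spec : Claim_unchanged_find_k_items := by
  intro k themes _ hD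
  show PySem.Str.join " "
      ((if (((pvLoop1 k themes PySem.Set.empty []).2.length : Nat) : Int) < k
        then pvLoop2 k themes (pvLoop1 k themes PySem.Set.empty []).1 (pvLoop1 k themes PySem.Set.empty []).2
        else (pvLoop1 k themes PySem.Set.empty []).2).map PySem.Int.toStr)
    = PySem.Str.join " "
      ((PySem.List.slice
          (PySem.List.sorted
              (PySem.Dict.keys ((PySem.List.enumerate themes).foldl
                (fun d (p : Int × Int) => d.setdefault p.2 p.1) PySem.Dict.empty))
              (fun t => ((PySem.List.enumerate themes).foldl
                (fun d (p : Int × Int) => d.setdefault p.2 p.1) PySem.Dict.empty).getD t 0)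
            ++ themes) none (some (max k 0))).map PySem.Int.toStr)
  rw [pvResultA k themes, pvResultB k themes]
  by_cases hk : 0 < k
  · rw [if_pos hk]
    have : max k 0 = k := by omega
    rw [this]
  · have hth : themes = [] := by
      by_contra hne
      exact hD ⟨by omega, hne⟩
    subst hth
    simp [pvFresh]

theorem find_k_items_changed : Claim_changed_find_k_items := by
  unfold Claim_changed_find_k_items; decide

theorem find_k_items_tight : Claim_exact_find_k_items := by
  intro k themes _ hD
  rcases hD with ⟨hk, hne⟩
  rcases themes with _ | ⟨t, ts⟩
  · exact absurd rfl hne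
  show PySem.Str.join " "
      ((if (((pvLoop1 k (t :: ts) PySem.Set.empty []).2.length : Nat) : Int) < k
        then pvLoop2 k (t :: ts) (pvLoop1 k (t :: ts) PySem.Set.empty []).1 (pvLoop1 k (t :: ts) PySem.Set.empty []).2
        else (pvLoop1 k (t :: ts) PySem.Set.empty []).2).map PySem.Int.toStr)
    ≠ PySem.Str.join " "
      ((PySem.List.slice
          (PySem.List.sorted
              (PySem.Dict.keys ((PySem.List.enumerate (t :: ts)).foldl
                (fun d (p : Int × Int) => d.setdefault p.2 p.1) PySem.Dict.empty))
              (fun x => ((PySem.List.enumerate (t :: ts)).foldl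
                (fun d (p : Int × Int) => d.setdefault p.2 p.1) PySem.Dict.empty).getD x 0)
            ++ (t :: ts)) none (some (max k 0))).map PySem.Int.toStr)
  rw [pvResultA k (t :: ts), pvResultB k (t :: ts), if_neg (by omega : ¬ (0:Int) < k)]
  have hmax : (max k 0).toNat = 0 := by omega
  rw [hmax, List.take_zero]
  have hfr : pvFresh (t :: ts) [] = t :: pvFresh ts (PySem.Set.add [] t) := by
    simp [pvFresh]
  rw [hfr]
  simp only [List.map_cons, List.map_nil]
  have hne' : PySem.Int.toStr t ≠ "" := by
    intro hc
    exact pvToChars_ne_nil t (by rw [← PySem.Int.toList_toStr, hc]; rfl)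
  have := pvJoin_ne_empty (PySem.Int.toStr t)
    ((pvFresh ts (PySem.Set.add [] t)).map PySem.Int.toStr) hne'
  simpa using this
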